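-- pv_equiv track=rewrite | github.com/yashab-cyber/HackGpt | security/authentication.py | _determine_role_from_groups
-- ===== SOURCE A (Python) =====
-- from enum import Enum
--
-- class Role(Enum):
--     ADMIN = "admin"
--     SENIOR_ANALYST = "senior_analyst"
--     ANALYST = "analyst"
--     VIEWER = "viewer"
--
-- def _determine_role_from_groups(member_of) -> str:
--     """Determine user role based on AD group membership"""
--     if not member_of:
--         return Role.VIEWER.value
--
--     # Convert to strings for checking
--     groups = [str(group).lower() for group in member_of]
--
--     # Check for admin groups
--     if any('hackgpt-admin' in group or 'pentest-admin' in group for group in groups):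
--         return Role.ADMIN.value
--     elif any('hackgpt-senior' in group or 'pentest-senior' in group for group in groups):
--         return Role.SENIOR_ANALYST.value
--     elif any('hackgpt-analyst' in group or 'pentest-analyst' in group for group in groups):
--         return Role.ANALYST.value
--     else:
--         return Role.VIEWER.value
-- ===== SOURCE B (Python) =====
-- _ROLE_NAMES = ('viewer', 'analyst', 'senior_analyst', 'admin')
--
--
-- def _rank(g):
--     """Priority rank of one lowercased group name (3 = admin ... 0 = none)."""
--     if 'hackgpt-admin' in g or 'pentest-admin' in g:
--         return 3
--     if 'hackgpt-senior' in g or 'pentest-senior' in g: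
--         return 2
--     if 'hackgpt-analyst' in g or 'pentest-analyst' in g:
--         return 1
--     return 0
--
--
-- def _determine_role_from_groups(member_of) -> str:
--     """Determine user role based on AD group membership"""
--     best = max((_rank(str(g).lower()) for g in member_of), default=0)
--     return _ROLE_NAMES[best]
-- ===== Notes on version B (the rewrite author's own statement) =====
-- stated objective: simpler
-- what changed: Replaces the empty guard plus three separate full-list any() scans with a single pass that ranks each group once (3=admin..0=none) and keeps the running maximum, indexing a role table with the best rank.
import Mathlib
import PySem

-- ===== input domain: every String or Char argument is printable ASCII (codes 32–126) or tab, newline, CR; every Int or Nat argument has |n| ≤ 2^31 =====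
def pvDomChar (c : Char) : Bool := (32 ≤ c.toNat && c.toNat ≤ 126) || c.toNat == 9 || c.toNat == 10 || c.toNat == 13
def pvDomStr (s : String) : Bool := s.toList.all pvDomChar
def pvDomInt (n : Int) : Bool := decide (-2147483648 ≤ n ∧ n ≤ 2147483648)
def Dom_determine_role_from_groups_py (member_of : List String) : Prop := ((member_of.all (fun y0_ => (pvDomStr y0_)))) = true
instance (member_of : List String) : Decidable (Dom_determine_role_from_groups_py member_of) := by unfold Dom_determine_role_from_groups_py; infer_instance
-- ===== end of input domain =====

-- B replaces A's empty-list guard and three separate any() scans with one pass that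
-- ranks each group (3=admin..0) and keeps the running maximum (objective: simpler).


-- ===== PORT A =====
def determine_role_from_groups_py (member_of : List String) : String :=
  if member_of = [] then "viewer"
  else
    let groups := member_of.map (fun g => PySem.Str.lower g)
    if groups.any (fun g => PySem.Str.isIn "hackgpt-admin" g || PySem.Str.isIn "pentest-admin" g) then
      "admin"
    else if groups.any (fun g => PySem.Str.isIn "hackgpt-senior" g || PySem.Str.isIn "pentest-senior" g) then
      "senior_analyst"
    else if groups.any (fun g => PySem.Str.isIn "hackgpt-analyst" g || PySem.Str.isIn "pentest-analyst" g) then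
      "analyst"
    else
      "viewer"

-- ===== PORT B =====
def pvRoleNames : List String := ["viewer", "analyst", "senior_analyst", "admin"]

def pvRank (g : String) : Nat :=
  if PySem.Str.isIn "hackgpt-admin" g || PySem.Str.isIn "pentest-admin" g then 3
  else if PySem.Str.isIn "hackgpt-senior" g || PySem.Str.isIn "pentest-senior" g then 2
  else if PySem.Str.isIn "hackgpt-analyst" g || PySem.Str.isIn "pentest-analyst" g then 1
  else 0

def determine_role_from_groups_py_alt (member_of : List String) : String :=
  let best := (member_of.map (fun g => pvRank (PySem.Str.lower g))).foldl max 0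
  pvRoleNames.getD best "viewer"

-- ===== PRECONDITION & SPEC =====
def Spec_determine_role_from_groups_py (member_of : List String) (out : String) : Prop := out = determine_role_from_groups_py_alt member_of
instance (member_of : List String) (out : String) : Decidable (Spec_determine_role_from_groups_py member_of out) := by unfold Spec_determine_role_from_groups_py; infer_instance

-- ===== CLAIM (what is proved, stated in full; the proofs are below) =====
def Claim_equal_determine_role_from_groups_py : Prop := ∀ (member_of : List String), Dom_determine_role_from_groups_py member_of → Spec_determine_role_from_groups_py member_of (determine_role_from_groups_py member_of)

-- ===== LEMMAS AND PROOFS =====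

-- the three any-scan tests of A, on a lowercased group
def pvP3 (g : String) : Bool := PySem.Str.isIn "hackgpt-admin" g || PySem.Str.isIn "pentest-admin" g
def pvP2 (g : String) : Bool := PySem.Str.isIn "hackgpt-senior" g || PySem.Str.isIn "pentest-senior" g
def pvP1 (g : String) : Bool := PySem.Str.isIn "hackgpt-analyst" g || PySem.Str.isIn "pentest-analyst" g

-- the rank of a group, expressed with the three tests
lemma pvRank_eq (g : String) :
    pvRank g = if pvP3 g then 3 else if pvP2 g then 2 else if pvP1 g then 1 else 0 := rfl

-- the running maximum of ranks as a function of A's three any-scans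
lemma foldl_max_rank (l : List String) (n : Nat) :
    (l.map (fun g => pvRank (PySem.Str.lower g))).foldl max n =
      max n (if l.any (fun g => pvP3 (PySem.Str.lower g)) then 3
        else if l.any (fun g => pvP2 (PySem.Str.lower g)) then 2
        else if l.any (fun g => pvP1 (PySem.Str.lower g)) then 1 else 0) := by
  induction l generalizing n with
  | nil => simp
  | cons x xs ih =>
    rw [List.map_cons, List.foldl_cons, ih]
    simp only [List.any_cons, pvRank_eq]
    rcases Bool.eq_false_or_eq_true (pvP3 (PySem.Str.lower x)) with h3 | h3 <;>
      rcases Bool.eq_false_or_eq_true (pvP2 (PySem.Str.lower x)) with h2 | h2 <;>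
        rcases Bool.eq_false_or_eq_true (pvP1 (PySem.Str.lower x)) with h1 | h1 <;>
          rcases Bool.eq_false_or_eq_true (xs.any (fun g => pvP3 (PySem.Str.lower g))) with k3 | k3 <;>
            rcases Bool.eq_false_or_eq_true (xs.any (fun g => pvP2 (PySem.Str.lower g))) with k2 | k2 <;>
              rcases Bool.eq_false_or_eq_true (xs.any (fun g => pvP1 (PySem.Str.lower g))) with k1 | k1 <;>
                simp [h3, h2, h1, k3, k2, k1]

-- ===== VERDICT (by name: the statement is the Claim_ definition above) =====
theorem determine_role_from_groups_py_spec : Claim_equal_determine_role_from_groups_py := by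
  intro member_of _
  unfold Spec_determine_role_from_groups_py determine_role_from_groups_py determine_role_from_groups_py_alt
  simp only [foldl_max_rank, List.any_map, Function.comp_def]
  rcases member_of with _ | ⟨x, xs⟩
  · simp [pvRoleNames]
  · simp only [if_neg (List.cons_ne_nil x xs)]
    show (if (x :: xs).any (fun g => pvP3 (PySem.Str.lower g)) then "admin"
      else if (x :: xs).any (fun g => pvP2 (PySem.Str.lower g)) then "senior_analyst"
      else if (x :: xs).any (fun g => pvP1 (PySem.Str.lower g)) then "analyst" else "viewer") = _
    cases h3 : (x :: xs).any (fun g => pvP3 (PySem.Str.lower g)) <;>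
      cases h2 : (x :: xs).any (fun g => pvP2 (PySem.Str.lower g)) <;>
        cases h1 : (x :: xs).any (fun g => pvP1 (PySem.Str.lower g)) <;>
          simp [pvRoleNames]
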